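-- pv_equiv track=rewrite | github.com/mvasanth/100Days | src/day1.py | getAggregateDepthList
-- ===== SOURCE A (Python) =====
-- SLIDING_WINDOW_SIZE = 3
--
-- def getAggregateDepthList(depthList):
--     """
--     Input: Takes in a list of depths (int)
--
--     Output: Returns a list of depths where each depth is the sum of depths in a sliding window
--             of the original list of depths.
--     """
--     aggregateDepths = []
--
--     for i in range(len(depthList) - (SLIDING_WINDOW_SIZE - 1)):
--         j = i + SLIDING_WINDOW_SIZE
--         sum = 0
--
--         # sum of depths for this sliding window
--         for depth in depthList[i:j]:
--             sum += depth
--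
--         aggregateDepths.append(sum)
--
--     return aggregateDepths
-- ===== SOURCE B (Python) =====
-- SLIDING_WINDOW_SIZE = 3
--
-- def getAggregateDepthList(depthList):
--     # prefix-sum table: P[k] = sum of first k depths
--     P = [0]
--     acc = 0
--     for d in depthList:
--         acc += d
--         P.append(acc)
--     result = []
--     for i in range(len(depthList) - (SLIDING_WINDOW_SIZE - 1)):
--         result.append(P[i + SLIDING_WINDOW_SIZE] - P[i])
--     return result
-- ===== Notes on version B (the rewrite author's own statement) =====
-- stated objective: faster
-- what changed: B builds a prefix-sum table in one pass and emits each window sum as a difference of two table entries, replacing A's per-window slice-and-sum inner loop.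
import Mathlib
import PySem

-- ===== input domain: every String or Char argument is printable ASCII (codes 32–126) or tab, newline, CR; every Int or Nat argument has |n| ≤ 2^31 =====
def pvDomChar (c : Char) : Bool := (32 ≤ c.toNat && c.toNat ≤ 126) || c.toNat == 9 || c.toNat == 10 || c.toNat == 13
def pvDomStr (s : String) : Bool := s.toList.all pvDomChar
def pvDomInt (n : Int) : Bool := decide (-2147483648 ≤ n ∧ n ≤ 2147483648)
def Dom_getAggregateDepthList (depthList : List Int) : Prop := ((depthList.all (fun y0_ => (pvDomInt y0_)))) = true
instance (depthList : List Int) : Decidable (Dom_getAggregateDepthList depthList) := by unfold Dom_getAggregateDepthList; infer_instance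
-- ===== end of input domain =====

-- B replaces A's per-window inner summation by a one-pass prefix-sum table and
-- per-window subtraction (objective: faster, constant-factor).

-- ===== PORT A =====
def getAggregateDepthList (depthList : List Int) : List Int :=
  (PySem.List.pyRange 0 ((depthList.length : Int) - (3 - 1)) 1).foldl
    (fun aggregateDepths i =>
      let j := i + 3
      let s := (PySem.List.slice depthList (some i) (some j)).foldl (fun sum depth => sum + depth) 0
      aggregateDepths ++ [s]) []

-- ===== PORT B =====
-- P[i]/P[i+3] indices are always in range (0 ≤ i, i+3 ≤ |P|-1), so pyGetD with
-- default 0 is exact here.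
def getAggregateDepthList_alt (depthList : List Int) : List Int :=
  let st := depthList.foldl (fun (st : List Int × Int) d =>
      let acc := st.2 + d
      (st.1 ++ [acc], acc)) ([0], 0)
  let P := st.1
  (PySem.List.pyRange 0 ((depthList.length : Int) - (3 - 1)) 1).foldl
    (fun result i => result ++ [PySem.List.pyGetD P (i + 3) 0 - PySem.List.pyGetD P i 0]) []

-- ===== PRECONDITION & SPEC =====
def Spec_getAggregateDepthList (depthList : List Int) (out : List Int) : Prop := out = getAggregateDepthList_alt depthList
instance (depthList : List Int) (out : List Int) : Decidable (Spec_getAggregateDepthList depthList out) := by unfold Spec_getAggregateDepthList; infer_instance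

-- ===== CLAIM (what is proved, stated in full; the proofs are below) =====
def Claim_equal_getAggregateDepthList : Prop := ∀ (depthList : List Int), Dom_getAggregateDepthList depthList → Spec_getAggregateDepthList depthList (getAggregateDepthList depthList)

-- ===== LEMMAS AND PROOFS =====

theorem pvFoldlAppendMap {α β : Type} (l : List α) (f : α → β) (acc : List β) :
    l.foldl (fun a x => a ++ [f x]) acc = acc ++ l.map f := by
  induction l generalizing acc with
  | nil => simp
  | cons x t ih => simp [List.foldl, ih]

theorem pvFoldlSum (l : List Int) (a : Int) :
    l.foldl (fun s d => s + d) a = a + l.sum := by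
  induction l generalizing a with
  | nil => simp
  | cons x t ih => simp [List.foldl, ih]; ring

-- the prefix list produced by B's first fold, starting from running total a
def pvPfx : List Int → Int → List Int
  | [], _ => []
  | d :: t, a => (a + d) :: pvPfx t (a + d)

theorem pvPfxFold (xs : List Int) (P0 : List Int) (a : Int) :
    xs.foldl (fun (st : List Int × Int) d => (st.1 ++ [st.2 + d], st.2 + d)) (P0, a)
      = (P0 ++ pvPfx xs a, a + xs.sum) := by
  induction xs generalizing P0 a with
  | nil => simp [pvPfx]
  | cons d t ih => simp [List.foldl, ih, pvPfx]; ring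

theorem pvPfxLength (xs : List Int) (a : Int) : (pvPfx xs a).length = xs.length := by
  induction xs generalizing a with
  | nil => rfl
  | cons d t ih => simp [pvPfx, ih]

theorem pvPfxGet (xs : List Int) (a : Int) (k : Nat) (hk : k < xs.length) :
    (pvPfx xs a)[k]'(by rw [pvPfxLength]; exact hk) = a + (xs.take (k + 1)).sum := by
  induction xs generalizing a k with
  | nil => simp at hk
  | cons d t ih =>
    cases k with
    | zero => simp [pvPfx]
    | succ m =>
      simp only [pvPfx, List.getElem_cons_succ, List.take_succ_cons, List.sum_cons]
      rw [ih (a + d) m (by simpa using hk)]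
      ring

-- P = 0 :: pvPfx xs 0 ; its entry at k (k ≤ n) is (xs.take k).sum
theorem pvPGet (xs : List Int) (k : Nat) (hk : k ≤ xs.length) :
    ((0 : Int) :: pvPfx xs 0).getD k 0 = (xs.take k).sum := by
  cases k with
  | zero => simp
  | succ m =>
    have hm : m < xs.length := by omega
    rw [List.getD_cons_succ, List.getD_eq_getElem _ _ (by rw [pvPfxLength]; exact hm),
        pvPfxGet xs 0 m hm]
    simp

theorem getAggregateDepthList_spec_aux (xs : List Int) :
    getAggregateDepthList xs = getAggregateDepthList_alt xs := by
  unfold getAggregateDepthList getAggregateDepthList_alt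
  rw [pvPfxFold]
  simp only [pvFoldlAppendMap, List.nil_append]
  apply List.map_congr_left
  intro i hi
  have hmem := (PySem.List.mem_pyRange_one.mp hi)
  obtain ⟨h0, h1⟩ := hmem
  set n := xs.length with hn
  have hin : i < (n : Int) - 2 := by exact_mod_cast h1
  have hi0 : 0 ≤ i := h0
  set k := i.toNat with hk
  have hik : i = (k : Int) := (Int.toNat_of_nonneg hi0).symm
  have hkn : k + 3 ≤ n := by omega
  -- A's window value
  rw [PySem.List.slice_toNat _ hi0 (by omega), pvFoldlSum]
  have htoNat : (i + 3).toNat = k + 3 := by omega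
  have htoNat2 : i.toNat = k := rfl
  rw [htoNat, htoNat2]
  -- B's value via pyGetD
  have h3 : (k : Int) + 3 = ((k + 3 : Nat) : Int) := by push_cast; ring
  rw [hik, h3, PySem.List.pyGetD_natCast, PySem.List.pyGetD_natCast, List.singleton_append]
  rw [pvPGet xs (k + 3) hkn, pvPGet xs k (by omega)]
  have : xs.take (k + 3) = xs.take k ++ (xs.drop k).take 3 := by
    rw [← List.take_add]
  rw [this, List.sum_append]
  have hshow : (k : Nat) + 3 - k = 3 := by omega
  rw [hshow]
  ring

-- ===== VERDICT (by name: the statement is the Claim_ definition above) =====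
theorem getAggregateDepthList_spec : Claim_equal_getAggregateDepthList := by
  intro xs _
  exact getAggregateDepthList_spec_aux xs
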